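-- pv_equiv track=rewrite | github.com/zhouchen0603/PythonProject | Practice/z_tickets.py | covert
-- ===== SOURCE A (Python) =====
-- def covert(tickets):
--     ti_dict = {}
--     for i in range(len(tickets)):
--         if tickets[i][0] in ti_dict.keys():
--             ti_dict[tickets[i][0]].append(tickets[i][1])
--         else:
--             ti_dict[tickets[i][0]] = [tickets[i][1]]
--     for key in ti_dict.keys():
--         ti_dict[key] = sorted(ti_dict[key])
--     return ti_dict
-- ===== SOURCE B (Python) =====
-- def covert(tickets):
--     # One pass: keep each group's list sorted as we go, inserting every
--     # destination at its position (stable: after equal elements).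
--     def _insert(x, lst):
--         if not lst or x < lst[0]:
--             return [x] + lst
--         return [lst[0]] + _insert(x, lst[1:])
--     groups = {}
--     for origin, dest in tickets:
--         groups[origin] = _insert(dest, groups.get(origin, []))
--     return groups
-- ===== Notes on version B (the rewrite author's own statement) =====
-- stated objective: alternative
-- what changed: Instead of appending destinations per origin and then sorting every group in a second pass, B makes a single pass that keeps each origin's list sorted at all times by inserting each destination at its ordered position (online insertion sort per group).
import Mathlib
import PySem

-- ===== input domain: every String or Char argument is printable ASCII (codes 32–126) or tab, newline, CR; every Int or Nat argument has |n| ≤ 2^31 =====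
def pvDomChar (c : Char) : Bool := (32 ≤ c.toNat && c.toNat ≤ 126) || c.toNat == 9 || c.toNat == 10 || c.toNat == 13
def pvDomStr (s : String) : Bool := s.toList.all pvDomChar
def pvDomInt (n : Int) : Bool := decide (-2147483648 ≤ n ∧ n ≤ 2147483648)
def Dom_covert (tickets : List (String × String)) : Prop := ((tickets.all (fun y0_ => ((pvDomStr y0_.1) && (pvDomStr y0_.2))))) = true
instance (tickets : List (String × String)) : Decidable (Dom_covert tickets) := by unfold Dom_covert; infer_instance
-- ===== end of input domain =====

-- B differs from A by keeping every group sorted online (ordered insertion per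
-- ticket, one pass) instead of appending and sorting each group afterwards;
-- same cost class, stated as an alternative algorithm, not a speedup.

-- ===== PORT A =====
-- first loop: build the dict, appending destinations per origin
-- (for i in range(len(tickets)) iterating the list in order = foldl over it)
def covertStep (d : PySem.Dict String (List String)) (t : String × String) :
    PySem.Dict String (List String) :=
  if d.contains t.1 then d.insert t.1 (d.getD t.1 [] ++ [t.2])
  else d.insert t.1 [t.2]

-- second loop: 'for key in ti_dict.keys(): ti_dict[key] = sorted(ti_dict[key])'
-- reassigns every existing key in place; since a dict's keys are unique this
-- replaces each value by its sorted version, item by item.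
def covert (tickets : List (String × String)) : List (String × List String) :=
  ((tickets.foldl covertStep PySem.Dict.empty).items).map
    (fun p => (p.1, PySem.List.sorted p.2 (fun x => x)))

-- ===== PORT B =====
-- _insert(x, lst): put x before the first strictly larger element
def insB (x : String) : List String → List String
  | [] => [x]
  | y :: ys => if x < y then x :: y :: ys else y :: insB x ys

def covert_alt (tickets : List (String × String)) : List (String × List String) :=
  (tickets.foldl
      (fun d t => d.insert t.1 (insB t.2 (d.getD t.1 []))) PySem.Dict.empty).items

-- ===== PRECONDITION & SPEC =====
def Spec_covert (tickets : List (String × String)) (out : List (String × List String)) : Prop := out = covert_alt tickets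
instance (tickets : List (String × String)) (out : List (String × List String)) : Decidable (Spec_covert tickets out) := by unfold Spec_covert; infer_instance

-- ===== CLAIM (what is proved, stated in full; the proofs are below) =====
def Claim_equal_covert : Prop := ∀ (tickets : List (String × String)), Dom_covert tickets → Spec_covert tickets (covert tickets)

-- ===== LEMMAS AND PROOFS =====

-- sort a list of strings (the value transform of A's second loop)
def sortF (v : List String) : List String := PySem.List.sorted v (fun x => x)

def mapF (p : String × List String) : String × List String := (p.1, sortF p.2)

theorem insB_eq_insertBy (x : String) (l : List String) :
    insB x l = PySem.List.insertBy (fun a b => decide (a < b)) x l := by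
  induction l with
  | nil => simp [insB, PySem.List.insertBy]
  | cons y ys ih => by_cases h : x < y <;> simp [insB, PySem.List.insertBy, h, ih]

theorem sortF_append_singleton (v : List String) (x : String) :
    sortF (v ++ [x]) = insB x (sortF v) := by
  simp only [sortF, PySem.List.sorted_eq_foldl_insertBy, List.foldl_append, List.foldl_cons,
    List.foldl_nil, insB_eq_insertBy]

theorem find?_map_mapF (its : List (String × List String)) (k : String) :
    (its.map mapF).find? (fun p => p.1 == k) =
      (its.find? (fun p => p.1 == k)).map mapF := by
  induction its with
  | nil => simp
  | cons p rest ih =>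
      by_cases h : p.1 == k <;> simp [List.find?, mapF, h, ih]

theorem get?_mk_map_mapF (its : List (String × List String)) (k : String) :
    (PySem.Dict.mk (its.map mapF)).get? k =
      ((PySem.Dict.mk its).get? k).map sortF := by
  simp only [PySem.Dict.get?, find?_map_mapF]
  cases its.find? (fun p => p.1 == k) <;> simp [mapF]

theorem getD_mk_map_mapF (its : List (String × List String)) (k : String) :
    (PySem.Dict.mk (its.map mapF)).getD k [] =
      sortF ((PySem.Dict.mk its).getD k []) := by
  rw [PySem.Dict.getD_eq_get?_getD, PySem.Dict.getD_eq_get?_getD, get?_mk_map_mapF]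
  cases (PySem.Dict.mk its).get? k with
  | none => rfl
  | some v => simp [sortF]

theorem contains_mk_map_mapF (its : List (String × List String)) (k : String) :
    (PySem.Dict.mk (its.map mapF)).contains k = (PySem.Dict.mk its).contains k := by
  simp only [PySem.Dict.contains, List.any_map]
  rfl

-- A's step always stores getD ++ [x] (the else branch has getD = [])
theorem covertStep_eq (d : PySem.Dict String (List String)) (t : String × String) :
    covertStep d t = d.insert t.1 (d.getD t.1 [] ++ [t.2]) := by
  unfold covertStep
  by_cases h : d.contains t.1
  · simp [h]
  · simp only [Bool.not_eq_true] at h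
    simp [h, PySem.Dict.getD_of_not_contains d [] h]

-- one step preserves the invariant "B's dict = A's dict with sorted values"
theorem step_invariant (its : List (String × List String)) (t : String × String) :
    ((PySem.Dict.mk (its.map mapF)).insert t.1
        (insB t.2 ((PySem.Dict.mk (its.map mapF)).getD t.1 []))).items =
      ((covertStep (PySem.Dict.mk its) t).items).map mapF := by
  rw [covertStep_eq, getD_mk_map_mapF, ← sortF_append_singleton]
  rw [PySem.Dict.items_insert, PySem.Dict.items_insert, contains_mk_map_mapF]
  by_cases h : (PySem.Dict.mk its).contains t.1
  · simp only [h, if_true, List.map_map]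
    apply List.map_congr_left
    intro p _
    by_cases hp : p.1 == t.1 <;> simp [mapF, hp, Function.comp]
  · simp only [h, if_false, Bool.false_eq_true]
    simp [mapF]

-- the whole loop: B's dict is A's dict with every value sorted
theorem loop_invariant (l : List (String × String)) :
    ∀ (its : List (String × List String)),
      (l.foldl (fun d t => d.insert t.1 (insB t.2 (d.getD t.1 [])))
          (PySem.Dict.mk (its.map mapF))).items =
        ((l.foldl covertStep (PySem.Dict.mk its)).items).map mapF := by
  induction l with
  | nil => intro its; simp
  | cons t l ih =>
      intro its
      rw [List.foldl_cons, List.foldl_cons]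
      have hB : (PySem.Dict.mk (its.map mapF)).insert t.1
            (insB t.2 ((PySem.Dict.mk (its.map mapF)).getD t.1 []))
          = PySem.Dict.mk (((covertStep (PySem.Dict.mk its) t).items).map mapF) := by
        apply PySem.Dict.ext
        exact step_invariant its t
      have hA : covertStep (PySem.Dict.mk its) t
          = PySem.Dict.mk ((covertStep (PySem.Dict.mk its) t).items) := by
        apply PySem.Dict.ext; rfl
      rw [hB, hA, ih]

-- ===== VERDICT (by name: the statement is the Claim_ definition above) =====
theorem covert_spec : Claim_equal_covert := by
  intro tickets _
  unfold Spec_covert covert covert_alt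
  have h := loop_invariant tickets []
  simp only [List.map_nil] at h
  have hempty : (PySem.Dict.empty : PySem.Dict String (List String)) = PySem.Dict.mk [] := by
    apply PySem.Dict.ext; rfl
  rw [hempty, h]
  rfl
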